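-- pv_equiv track=rewrite | github.com/sasolanki03/ElevateLab-Project | password_tool.py | generate_case_variations
-- ===== SOURCE A (Python) =====
-- def generate_case_variations(word):
--     """
--     Generates variations of a word with different casing (e.g., hello, Hello, HELLO).
--     """
--     variations = {word.lower(), word.capitalize(), word.upper()}
--     # Add toggle case (e.g., hElLo) for shorter words
--     if len(word) <= 7: # Limit to avoid excessive combinations
--         for i in range(1 << len(word)):
--             temp_word = []
--             for j, char in enumerate(word):
--                 if (i >> j) & 1:
--                     temp_word.append(char.upper())
--                 else:
--                     temp_word.append(char.lower())
--             variations.add("".join(temp_word))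
--     return variations
-- ===== SOURCE B (Python) =====
-- def generate_case_variations(word):
--     """
--     Generates variations of a word with different casing (e.g., hello, Hello, HELLO).
--     """
--     variations = {word.lower(), word.capitalize(), word.upper()}
--     # For short words, build all upper/lower combinations by extending
--     # partial words one character at a time (lower branch first).
--     if len(word) <= 7:
--         combos = [""]
--         for ch in word:
--             lo, up = ch.lower(), ch.upper()
--             combos = [p + lo for p in combos] + [p + up for p in combos]
--         variations.update(combos)
--     return variations
-- ===== Notes on version B (the rewrite author's own statement) =====
-- stated objective: alternative
-- what changed: A decodes the bits of an integer mask 0..2^len-1 to pick each character's case; B never touches bit arithmetic and instead grows the list of combinations one character at a time, appending the lower- and upper-case variant of each character to every partial word.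
import Mathlib
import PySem

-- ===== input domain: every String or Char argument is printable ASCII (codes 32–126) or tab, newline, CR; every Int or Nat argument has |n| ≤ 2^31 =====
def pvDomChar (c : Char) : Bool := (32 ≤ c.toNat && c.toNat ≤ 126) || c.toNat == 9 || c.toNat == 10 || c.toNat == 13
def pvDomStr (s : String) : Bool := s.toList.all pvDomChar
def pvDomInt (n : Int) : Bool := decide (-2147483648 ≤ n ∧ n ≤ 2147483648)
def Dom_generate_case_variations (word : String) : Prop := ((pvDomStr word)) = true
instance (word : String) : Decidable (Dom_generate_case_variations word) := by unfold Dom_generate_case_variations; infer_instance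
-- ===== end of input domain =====

-- B replaces A's bitmask decoding of each casing by extending partial words one character at a
-- time (lower branch first), producing the same set in the same insertion order; objective: alternative.

-- shared helper: Python str.capitalize() — first char uppercased, rest lowercased (exact on ASCII)
def pvCapitalize (word : String) : String :=
  match word.toList with
  | [] => String.ofList []
  | c :: rest => String.ofList (PySem.Chars.upperChar c :: PySem.Chars.lower rest)

-- ===== PORT A =====
-- A's inner loop: temp_word = []; for j, char in enumerate(word): append char.upper()/char.lower() by bit j of i
def pvTempWord (word : String) (i : Int) : List String :=
  (PySem.List.enumerate word.toList).foldl
    (fun temp p =>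
      if PySem.Int.band (i >>> p.1.toNat) 1 = 1 then
        temp ++ [String.ofList [PySem.Chars.upperChar p.2]]
      else
        temp ++ [String.ofList [PySem.Chars.lowerChar p.2]]) []

def generate_case_variations (word : String) : List String :=
  let variations : PySem.Set String :=
    PySem.Set.ofList [PySem.Str.lower word, pvCapitalize word, PySem.Str.upper word]
  if PySem.Str.len word ≤ 7 then
    (PySem.List.pyRange 0 (1 <<< word.toList.length) 1).foldl
      (fun s i => PySem.Set.add s (PySem.Str.join "" (pvTempWord word i))) variations
  else variations

-- ===== PORT B =====
-- B's loop body: combos = [p + ch.lower() for p in combos] + [p + ch.upper() for p in combos]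
-- (string concatenation p + c ported on code points, exact)
def pvCombosStep (combos : List String) (ch : Char) : List String :=
  combos.map (fun p => String.ofList (p.toList ++ [PySem.Chars.lowerChar ch])) ++
  combos.map (fun p => String.ofList (p.toList ++ [PySem.Chars.upperChar ch]))

def generate_case_variations_alt (word : String) : List String :=
  let variations : PySem.Set String :=
    PySem.Set.ofList [PySem.Str.lower word, pvCapitalize word, PySem.Str.upper word]
  if PySem.Str.len word ≤ 7 then
    PySem.Set.update variations (word.toList.foldl pvCombosStep [String.ofList []])
  else variations

-- ===== PRECONDITION & SPEC =====
def Spec_generate_case_variations (word : String) (out : List String) : Prop := out = generate_case_variations_alt word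
instance (word : String) (out : List String) : Decidable (Spec_generate_case_variations word out) := by unfold Spec_generate_case_variations; infer_instance

-- ===== CLAIM (what is proved, stated in full; the proofs are below) =====
def Claim_equal_generate_case_variations : Prop := ∀ (word : String), Dom_generate_case_variations word → Spec_generate_case_variations word (generate_case_variations word)

-- ===== LEMMAS AND PROOFS =====

-- char-level picture of A's i-th casing (Nat mask, read through testBit)
def pvGChars (k : Nat) (cs : List Char) : List Char :=
  (PySem.List.enumerate cs).map
    (fun p => if k.testBit p.1.toNat then PySem.Chars.upperChar p.2 else PySem.Chars.lowerChar p.2)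

-- char-level picture of B's combos list
def pvCombosL (cs : List Char) : List (List Char) :=
  cs.foldl
    (fun acc c => acc.map (· ++ [PySem.Chars.lowerChar c]) ++ acc.map (· ++ [PySem.Chars.upperChar c]))
    [[]]

lemma pvBit (k j : Nat) :
    (PySem.Int.band ((k:Int) >>> ((j:Nat):Int)) 1 = 1) = (Nat.testBit k j = true) := by
  rw [Int.shiftRight_natCast]
  rw [show (1 : Int) = ((1:Nat) : Int) from rfl, PySem.Int.band_natCast]
  simp [Nat.testBit, Nat.and_one_is_mod]
  norm_cast

lemma pvTempAux (i : Int) : ∀ (l : List (Int × Char)) (acc : List String),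
    l.foldl
      (fun temp p =>
        if PySem.Int.band (i >>> p.1.toNat) 1 = 1 then
          temp ++ [String.ofList [PySem.Chars.upperChar p.2]]
        else
          temp ++ [String.ofList [PySem.Chars.lowerChar p.2]]) acc
    = acc ++ l.map (fun p => String.ofList
        [if PySem.Int.band (i >>> p.1.toNat) 1 = 1 then PySem.Chars.upperChar p.2 else PySem.Chars.lowerChar p.2])
  | [], acc => by simp
  | p :: l, acc => by
      rw [List.foldl_cons, pvTempAux i l]
      split <;> simp_all

lemma pvTempWord_eq (word : String) (k : Nat) :
    pvTempWord word (k : Int) = (pvGChars k word.toList).map (fun c => String.ofList [c]) := by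
  unfold pvTempWord pvGChars
  rw [pvTempAux]
  simp only [List.nil_append, List.map_map]
  apply List.map_congr_left
  intro p _
  simp only [Function.comp]
  simp only [pvBit]

lemma pvJoin_singletons (l : List Char) :
    PySem.Str.join "" (l.map (fun c => String.ofList [c])) = String.ofList l := by
  apply String.toList_inj.mp
  rw [PySem.Str.toList_join]
  simp only [List.map_map]
  rw [show (String.toList ∘ fun c => String.ofList [c]) = (fun c => [c]) by funext c; simp]
  simp

lemma pvEnumerate_append_singleton {α : Type} (xs : List α) (x : α) (s : Int) :
    PySem.List.enumerate (xs ++ [x]) s = PySem.List.enumerate xs s ++ [(s + xs.length, x)] := by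
  induction xs generalizing s with
  | nil => simp [PySem.List.enumerate_cons, PySem.List.enumerate_nil]
  | cons y ys ih =>
      simp only [List.cons_append, PySem.List.enumerate_cons, ih, List.length_cons]
      push_cast
      ring_nf

lemma pvGChars_append (k : Nat) (cs : List Char) (c : Char) :
    pvGChars k (cs ++ [c]) = pvGChars k cs
      ++ [if k.testBit cs.length then PySem.Chars.upperChar c else PySem.Chars.lowerChar c] := by
  unfold pvGChars
  rw [pvEnumerate_append_singleton, List.map_append]
  simp

lemma pvGChars_shift (k n : Nat) (cs : List Char) (h : cs.length ≤ n) :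
    pvGChars (2 ^ n + k) cs = pvGChars k cs := by
  unfold pvGChars
  apply List.map_congr_left
  intro p hp
  obtain ⟨j, hj, rfl⟩ := (PySem.List.mem_enumerate_iff _ _ _).mp hp
  simp only [zero_add, Int.toNat_natCast]
  rw [Nat.testBit_two_pow_add_gt (lt_of_lt_of_le hj h)]

lemma pvKey (cs : List Char) :
    (List.range (2 ^ cs.length)).map (fun k => pvGChars k cs) = pvCombosL cs := by
  induction cs using List.reverseRecOn with
  | nil => simp [pvGChars, pvCombosL, PySem.List.enumerate_nil]
  | append_singleton cs c ih =>
      have hsplit : List.range (2 ^ (cs ++ [c]).length)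
          = List.range (2 ^ cs.length) ++ (List.range (2 ^ cs.length)).map (2 ^ cs.length + ·) := by
        rw [List.length_append, List.length_singleton, pow_succ, mul_two, List.range_add]
      rw [hsplit, List.map_append]
      have hlow : (List.range (2 ^ cs.length)).map (fun k => pvGChars k (cs ++ [c]))
          = (pvCombosL cs).map (· ++ [PySem.Chars.lowerChar c]) := by
        rw [← ih, List.map_map]
        apply List.map_congr_left
        intro k hk
        simp only [Function.comp]
        rw [pvGChars_append, Nat.testBit_lt_two_pow (List.mem_range.mp hk)]
        simp
      have hhigh : ((List.range (2 ^ cs.length)).map (2 ^ cs.length + ·)).map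
            (fun k => pvGChars k (cs ++ [c]))
          = (pvCombosL cs).map (· ++ [PySem.Chars.upperChar c]) := by
        rw [List.map_map, ← ih, List.map_map]
        apply List.map_congr_left
        intro k hk
        simp only [Function.comp]
        rw [pvGChars_append, Nat.testBit_two_pow_add_eq,
            Nat.testBit_lt_two_pow (List.mem_range.mp hk), pvGChars_shift _ _ _ le_rfl]
        simp
      rw [hlow, hhigh]
      unfold pvCombosL
      rw [List.foldl_append]
      simp

lemma pvCombos_aux (cs : List Char) : ∀ (l : List (List Char)),
    cs.foldl pvCombosStep (l.map String.ofList)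
      = (cs.foldl (fun acc c => acc.map (· ++ [PySem.Chars.lowerChar c]) ++ acc.map (· ++ [PySem.Chars.upperChar c])) l).map String.ofList := by
  induction cs with
  | nil => intro l; rfl
  | cons c cs ih =>
      intro l
      rw [List.foldl_cons, List.foldl_cons, ← ih]
      congr 1
      unfold pvCombosStep
      simp only [List.map_append, List.map_map]
      congr 1 <;> (apply List.map_congr_left; intro p _; simp)

lemma pvCombos_eq (cs : List Char) :
    cs.foldl pvCombosStep [String.ofList []] = (pvCombosL cs).map String.ofList := by
  have := pvCombos_aux cs [[]]
  simpa [pvCombosL] using this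

lemma pvShiftLen (n : Nat) : ((((1 <<< n : Nat) : Int)) - 0).toNat = 2 ^ n := by
  rw [sub_zero, Int.toNat_natCast, Nat.one_shiftLeft]

lemma pvMaskList_eq_combos (word : String) :
    (PySem.List.pyRange 0 (1 <<< word.toList.length) 1).map
        (fun i => PySem.Str.join "" (pvTempWord word i))
      = word.toList.foldl pvCombosStep [String.ofList []] := by
  rw [PySem.List.pyRange_one, List.map_map, pvCombos_eq, ← pvKey, List.map_map]
  rw [pvShiftLen]
  apply List.map_congr_left
  intro k _
  simp only [Function.comp, zero_add]
  rw [pvTempWord_eq, pvJoin_singletons]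

-- ===== VERDICT (by name: the statement is the Claim_ definition above) =====
theorem generate_case_variations_spec : Claim_equal_generate_case_variations := by
  intro word _
  unfold Spec_generate_case_variations generate_case_variations generate_case_variations_alt
  split
  · rw [← PySem.Set.update_map_eq_foldl_add, pvMaskList_eq_combos]
  · rfl
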